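-- pv_equiv track=rewrite | github.com/itpick/warlords2-decompile | tools/analyze_scenario_roads.py | analyze_neighbors
-- ===== SOURCE A (Python) =====
-- from collections import defaultdict, Counter
--
-- def analyze_neighbors(rd_data, width=112, height=156):
--     """For each road tile, compute the neighbor mask and record the RD value.
--     Returns dict: mask -> Counter of RD values."""
--     mask_to_rd = defaultdict(Counter)
--     height = min(height, len(rd_data) // width)
--
--     for y in range(height):
--         for x in range(width):
--             rd = rd_data[y * width + x]
--             if rd == 0:
--                 continue
--
--             # Check 4 cardinal neighbors for any road presence
--             mask = 0
--             if y > 0 and rd_data[(y-1) * width + x] != 0: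
--                 mask |= 1  # N
--             if x < width-1 and rd_data[y * width + x + 1] != 0:
--                 mask |= 2  # E
--             if y < height-1 and rd_data[(y+1) * width + x] != 0:
--                 mask |= 4  # S
--             if x > 0 and rd_data[y * width + x - 1] != 0:
--                 mask |= 8  # W
--
--             mask_to_rd[mask][rd] += 1
--
--     return mask_to_rd
-- ===== SOURCE B (Python) =====
-- from collections import defaultdict, Counter
--
-- def analyze_neighbors(rd_data, width=112, height=156):
--     """Two-pass rewrite: scatter E/W and S/N neighbor bits into a flat mask
--     array (each tile only looks right and down), then a counting pass."""
--     mask_to_rd = defaultdict(Counter)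
--     height = min(height, len(rd_data) // width)
--     if width <= 0 or height <= 0:
--         return mask_to_rd
--     n = width * height
--     masks = [0] * n
--     for i in range(n):
--         if i % width != width - 1:           # tile has an east neighbor
--             if rd_data[i + 1] != 0:
--                 masks[i] += 2                # E
--             if rd_data[i] != 0:
--                 masks[i + 1] += 8            # W on that neighbor
--         if i + width < n:                    # tile has a south neighbor
--             if rd_data[i + width] != 0:
--                 masks[i] += 4                # S
--             if rd_data[i] != 0:
--                 masks[i + width] += 1        # N on that neighbor
--     for i in range(n):
--         rd = rd_data[i]
--         if rd != 0:
--             mask_to_rd[masks[i]][rd] += 1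
--     return mask_to_rd
-- ===== Notes on version B (the rewrite author's own statement) =====
-- stated objective: alternative
-- what changed: Replaces the per-tile gather of all four neighbors inside one nested y/x loop by two flat passes: a scatter pass over flat indices that checks only the east and south neighbor of each tile and sets the reciprocal W/N bits on the neighbor, then a counting pass over the precomputed mask array.
import Mathlib
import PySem

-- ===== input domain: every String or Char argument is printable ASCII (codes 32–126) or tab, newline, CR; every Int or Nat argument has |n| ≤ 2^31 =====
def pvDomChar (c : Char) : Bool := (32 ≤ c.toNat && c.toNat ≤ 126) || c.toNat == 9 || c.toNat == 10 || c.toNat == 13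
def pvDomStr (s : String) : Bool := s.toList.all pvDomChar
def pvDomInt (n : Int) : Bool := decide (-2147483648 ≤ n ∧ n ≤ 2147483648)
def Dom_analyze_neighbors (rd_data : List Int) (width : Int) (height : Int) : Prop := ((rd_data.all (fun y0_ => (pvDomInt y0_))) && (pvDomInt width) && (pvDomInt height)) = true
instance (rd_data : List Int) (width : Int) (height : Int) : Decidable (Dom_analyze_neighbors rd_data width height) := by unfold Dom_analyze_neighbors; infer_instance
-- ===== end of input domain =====

-- B replaces A's per-tile gather of all four neighbors inside a nested y/x loop by a flat scatter
-- pass (each tile checks only its east and south neighbor and sets the reciprocal W/N bits on the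
-- neighbor) followed by a counting pass over the precomputed mask array.

-- ===== PORT A =====
-- record one (mask, rd) observation: mask_to_rd[mask][rd] += 1 on a defaultdict(Counter)
def pvRecord (d : PySem.Dict Int (PySem.Dict Int Int)) (mask rd : Int) : PySem.Dict Int (PySem.Dict Int Int) :=
  d.modify mask PySem.Dict.empty (fun c => c.modify rd 0 (· + 1))

-- the neighbor-mask block of A's loop body (A's four `mask |=` checks, verbatim)
def pvMaskAt (rd_data : List Int) (width height y x : Int) : Int :=
  let mask : Int := 0
  let mask := if 0 < y ∧ PySem.List.pyGetD rd_data ((y - 1) * width + x) 0 ≠ 0 then PySem.Int.bor mask 1 else mask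
  let mask := if x < width - 1 ∧ PySem.List.pyGetD rd_data (y * width + x + 1) 0 ≠ 0 then PySem.Int.bor mask 2 else mask
  let mask := if y < height - 1 ∧ PySem.List.pyGetD rd_data ((y + 1) * width + x) 0 ≠ 0 then PySem.Int.bor mask 4 else mask
  if 0 < x ∧ PySem.List.pyGetD rd_data (y * width + x - 1) 0 ≠ 0 then PySem.Int.bor mask 8 else mask

-- Every rd_data index A reads is in range whenever the loops run (height is clamped to
-- len(rd_data)//width), so pyGetD with default 0 computes exactly Python's rd_data[...].
def analyze_neighbors (rd_data : List Int) (width : Int) (height : Int) : List (Int × List (Int × Int)) :=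
  let height := min height (PySem.Int.floordiv (rd_data.length : Int) width)
  let d := (PySem.List.pyRange 0 height 1).foldl (fun d y =>
    (PySem.List.pyRange 0 width 1).foldl (fun d x =>
      let rd := PySem.List.pyGetD rd_data (y * width + x) 0
      if rd = 0 then d
      else pvRecord d (pvMaskAt rd_data width height y x) rd) d) PySem.Dict.empty
  d.items.map (fun p => (p.1, p.2.items))

-- ===== PORT B =====
-- masks[j] += v  (every j B bumps is in range; List.set past the end would be a no-op)
def pvBump (masks : List Int) (j v : Int) : List Int :=
  masks.set j.toNat (PySem.List.pyGetD masks j 0 + v)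

-- the body of B's scatter loop (Source B's first `for i in range(n)`)
def pvScatterStep (rd_data : List Int) (width n : Int) (masks : List Int) (i : Int) : List Int :=
  let masks :=
    if PySem.Int.mod i width ≠ width - 1 then
      let masks := if PySem.List.pyGetD rd_data (i + 1) 0 ≠ 0 then pvBump masks i 2 else masks
      if PySem.List.pyGetD rd_data i 0 ≠ 0 then pvBump masks (i + 1) 8 else masks
    else masks
  if i + width < n then
    let masks := if PySem.List.pyGetD rd_data (i + width) 0 ≠ 0 then pvBump masks i 4 else masks
    if PySem.List.pyGetD rd_data i 0 ≠ 0 then pvBump masks (i + width) 1 else masks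
  else masks

def analyze_neighbors_alt (rd_data : List Int) (width : Int) (height : Int) : List (Int × List (Int × Int)) :=
  let height := min height (PySem.Int.floordiv (rd_data.length : Int) width)
  if width ≤ 0 ∨ height ≤ 0 then
    (PySem.Dict.empty : PySem.Dict Int (PySem.Dict Int Int)).items.map (fun p => (p.1, p.2.items))
  else
    let n := width * height
    let masks := (PySem.List.pyRange 0 n 1).foldl (pvScatterStep rd_data width n) (List.replicate n.toNat 0)
    let d := (PySem.List.pyRange 0 n 1).foldl (fun d i =>
      let rd := PySem.List.pyGetD rd_data i 0
      if rd ≠ 0 then pvRecord d (PySem.List.pyGetD masks i 0) rd else d) PySem.Dict.empty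
    d.items.map (fun p => (p.1, p.2.items))

-- ===== PRECONDITION & SPEC =====
-- Pre_ excludes exactly width = 0, where Python's `len(rd_data) // width` raises ZeroDivisionError (in A and in B alike).
def Pre_analyze_neighbors (rd_data : List Int) (width : Int) (height : Int) : Prop := width ≠ 0
instance (rd_data : List Int) (width : Int) (height : Int) : Decidable (Pre_analyze_neighbors rd_data width height) := by unfold Pre_analyze_neighbors; infer_instance

def pvWitness_analyze_neighbors : List Int × Int × Int := ([1, 1], 2, 1)

def Spec_analyze_neighbors (rd_data : List Int) (width : Int) (height : Int) (out : List (Int × List (Int × Int))) : Prop := out = analyze_neighbors_alt rd_data width height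
instance (rd_data : List Int) (width : Int) (height : Int) (out : List (Int × List (Int × Int))) : Decidable (Spec_analyze_neighbors rd_data width height out) := by unfold Spec_analyze_neighbors; infer_instance

-- ===== CLAIM (what is proved, stated in full; the proofs are below) =====
def Claim_equal_analyze_neighbors : Prop := ∀ (rd_data : List Int) (width : Int) (height : Int), Dom_analyze_neighbors rd_data width height → Pre_analyze_neighbors rd_data width height → Spec_analyze_neighbors rd_data width height (analyze_neighbors rd_data width height)

-- ===== LEMMAS AND PROOFS =====

-- the value masks[j] holds after the first k scatter iterations (k = n: the final mask of tile j)
def pvPmask (rd : List Int) (w n k j : Int) : Int :=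
    (if j - w < k ∧ 0 ≤ j - w ∧ PySem.List.pyGetD rd (j - w) 0 ≠ 0 then 1 else 0)
  + (if j < k ∧ PySem.Int.mod j w ≠ w - 1 ∧ PySem.List.pyGetD rd (j + 1) 0 ≠ 0 then 2 else 0)
  + (if j < k ∧ j + w < n ∧ PySem.List.pyGetD rd (j + w) 0 ≠ 0 then 4 else 0)
  + (if j - 1 < k ∧ 0 ≤ j - 1 ∧ PySem.Int.mod (j - 1) w ≠ w - 1 ∧ PySem.List.pyGetD rd (j - 1) 0 ≠ 0 then 8 else 0)

-- the common flat loop body both programs reduce to (proof-side only)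
def pvGFun (rd : List Int) (w n : Int) (d : PySem.Dict Int (PySem.Dict Int Int)) (i : Int) : PySem.Dict Int (PySem.Dict Int Int) :=
  if PySem.List.pyGetD rd i 0 = 0 then d else pvRecord d (pvPmask rd w n n i) (PySem.List.pyGetD rd i 0)

lemma pvCbump (f : Nat → Int) (m : Nat) (j v : Int) (hj : 0 ≤ j) (P : Prop) [Decidable P] :
    (if P then pvBump ((List.range m).map f) j v else (List.range m).map f)
    = (List.range m).map (fun t : Nat => if (t : Int) = j ∧ P then f t + v else f t) := by
  by_cases hP : P
  · simp only [if_pos hP]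
    unfold pvBump
    by_cases hjm : j.toNat < m
    · have hg : PySem.List.pyGetD ((List.range m).map f) j 0 = f j.toNat := by
        rw [PySem.List.pyGetD_eq_getElem _ _ hj (by simp; omega)]
        simp
      rw [hg]
      apply List.ext_getElem (by simp)
      intro t h1 h2
      simp only [List.getElem_set, List.getElem_map, List.getElem_range]
      split_ifs with e1 e2 e2
      · rw [e1]
      · exfalso; exact e2 ⟨by omega, hP⟩
      · exfalso; obtain ⟨e2a, _⟩ := e2; omega
      · rfl
    · rw [List.set_eq_of_length_le (by simp; omega)]
      symm; apply List.map_eq_map_iff.mpr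
      intro t ht; simp only [List.mem_range] at ht
      have h : ¬((t:Int) = j) := by omega
      simp [h]
  · simp only [if_neg hP]
    symm; apply List.map_eq_map_iff.mpr
    intro t ht; simp [hP]

lemma pvIteSplit (a b v : Int) (P R Q : Prop) [Decidable P] [Decidable R] [Decidable Q]
    (h1 : a = b ↔ R) (h2 : a = b → (P ↔ Q)) :
    (if a < b + 1 ∧ P then v else 0) = (if a < b ∧ P then v else 0) + (if R ∧ Q then v else 0) := by
  by_cases e : a = b
  · have hr : R := h1.mp e
    by_cases hp : P
    · have hq : Q := (h2 e).mp hp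
      rw [if_pos ⟨by omega, hp⟩, if_neg (fun h => by omega), if_pos ⟨hr, hq⟩]
      ring
    · have hq : ¬Q := fun q => hp ((h2 e).mpr q)
      rw [if_neg (fun h => hp h.2), if_neg (fun h => hp h.2), if_neg (fun h => hq h.2)]
      ring
  · have hr : ¬R := fun r => e (h1.mpr r)
    have hb : ((a < b + 1) ∧ P) = ((a < b) ∧ P) := by
      have h : (a < b + 1) ↔ (a < b) := by omega
      rw [h]
    simp only [hb]
    rw [if_neg (fun h : R ∧ Q => hr h.1)]
    ring

lemma pvPmask_succ (rd : List Int) (w n k j : Int) (hw : 0 < w) (hk : 0 ≤ k) (hj : 0 ≤ j) (hjn : j < n) :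
    pvPmask rd w n (k + 1) j = pvPmask rd w n k j
      + (if j = k ∧ ((PySem.Int.mod k w ≠ w - 1) ∧ PySem.List.pyGetD rd (k + 1) 0 ≠ 0) then 2 else 0)
      + (if j = k + 1 ∧ ((PySem.Int.mod k w ≠ w - 1) ∧ PySem.List.pyGetD rd k 0 ≠ 0) then 8 else 0)
      + (if j = k ∧ (k + w < n ∧ PySem.List.pyGetD rd (k + w) 0 ≠ 0) then 4 else 0)
      + (if j = k + w ∧ (k + w < n ∧ PySem.List.pyGetD rd k 0 ≠ 0) then 1 else 0) := by
  unfold pvPmask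
  rw [pvIteSplit (j - w) k 1 (0 ≤ j - w ∧ PySem.List.pyGetD rd (j - w) 0 ≠ 0)
        (j = k + w) (k + w < n ∧ PySem.List.pyGetD rd k 0 ≠ 0)
        (by omega)
        (fun e => by
          rw [← e]
          simp [show j - w + w = j by ring, hjn, show (0:Int) ≤ j - w by omega, show w ≤ j by omega])]
  rw [pvIteSplit j k 2 _ (j = k) ((PySem.Int.mod k w ≠ w - 1) ∧ PySem.List.pyGetD rd (k + 1) 0 ≠ 0)
        Iff.rfl (fun e => by rw [e])]
  rw [pvIteSplit j k 4 _ (j = k) (k + w < n ∧ PySem.List.pyGetD rd (k + w) 0 ≠ 0)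
        Iff.rfl (fun e => by rw [e])]
  rw [pvIteSplit (j - 1) k 8 (0 ≤ j - 1 ∧ PySem.Int.mod (j - 1) w ≠ w - 1 ∧ PySem.List.pyGetD rd (j - 1) 0 ≠ 0)
        (j = k + 1) ((PySem.Int.mod k w ≠ w - 1) ∧ PySem.List.pyGetD rd k 0 ≠ 0)
        (by omega)
        (fun e => by
          rw [← e]
          simp [show (0:Int) ≤ j - 1 by omega, show (1:Int) ≤ j by omega])]
  ring

lemma pvScatter_inv (rd : List Int) (w n : Int) (hw : 0 < w) (hn : 0 ≤ n) :
    ∀ (k : Nat), (k : Int) ≤ n →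
      (PySem.List.pyRange 0 (k : Int) 1).foldl (pvScatterStep rd w n) (List.replicate n.toNat 0)
      = (List.range n.toNat).map (fun t : Nat => pvPmask rd w n (k : Int) (t : Int)) := by
  intro k
  induction k with
  | zero =>
    intro _
    rw [PySem.List.pyRange_one_eq_nil (by norm_num)]
    simp only [List.foldl_nil, Nat.cast_zero]
    rw [show List.replicate n.toNat (0 : Int) = (List.range n.toNat).map (fun _ : Nat => (0 : Int)) from by simp]
    apply List.map_eq_map_iff.mpr
    intro t _
    unfold pvPmask
    split_ifs <;> omega
  | succ k ih =>
    intro hk1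
    have hk : (k : Int) ≤ n := by push_cast at hk1 ⊢; omega
    have h0k : (0 : Int) ≤ (k : Int) := by omega
    have hkn : (k : Int) < n := by push_cast at hk1; omega
    rw [show ((k + 1 : Nat) : Int) = (k : Int) + 1 by push_cast; ring]
    rw [PySem.List.pyRange_one_succ_right h0k, List.foldl_append, ih hk]
    simp only [List.foldl_cons, List.foldl_nil, pvScatterStep]
    by_cases hc1 : PySem.Int.mod (k : Int) w ≠ w - 1
    · rw [if_pos hc1,
          pvCbump _ _ (k : Int) 2 h0k _,
          pvCbump _ _ ((k : Int) + 1) 8 (by omega) _]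
      by_cases hc4 : (k : Int) + w < n
      · rw [if_pos hc4,
            pvCbump _ _ (k : Int) 4 h0k _,
            pvCbump _ _ ((k : Int) + w) 1 (by omega) _]
        apply List.map_eq_map_iff.mpr
        intro t ht
        simp only [List.mem_range] at ht
        rw [pvPmask_succ rd w n (k : Int) (t : Int) hw h0k (by omega) (by omega)]
        simp only [hc1, hc4, ne_eq, not_false_eq_true, true_and, and_true]
        all_goals (split_ifs <;> omega)
      · rw [if_neg hc4]
        apply List.map_eq_map_iff.mpr
        intro t ht
        simp only [List.mem_range] at ht
        rw [pvPmask_succ rd w n (k : Int) (t : Int) hw h0k (by omega) (by omega)]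
        simp only [hc1, hc4, ne_eq, not_false_eq_true, true_and, and_true, false_and, and_false,
          if_false, add_zero, ite_false]
        all_goals (split_ifs <;> omega)
    · rw [if_neg hc1]
      push_neg at hc1
      by_cases hc4 : (k : Int) + w < n
      · rw [if_pos hc4,
            pvCbump _ _ (k : Int) 4 h0k _,
            pvCbump _ _ ((k : Int) + w) 1 (by omega) _]
        apply List.map_eq_map_iff.mpr
        intro t ht
        simp only [List.mem_range] at ht
        rw [pvPmask_succ rd w n (k : Int) (t : Int) hw h0k (by omega) (by omega)]
        simp only [hc1, hc4, ne_eq, not_true_eq_false, true_and, and_true, false_and, and_false,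
          if_false, add_zero, ite_false]
        all_goals (split_ifs <;> omega)
      · rw [if_neg hc4]
        apply List.map_eq_map_iff.mpr
        intro t ht
        simp only [List.mem_range] at ht
        rw [pvPmask_succ rd w n (k : Int) (t : Int) hw h0k (by omega) (by omega)]
        simp only [hc1, hc4, ne_eq, not_true_eq_false, true_and, and_true, false_and, and_false,
          if_false, add_zero, ite_false]
        all_goals (split_ifs <;> omega)

lemma pvRowNonneg (w y x : Int) (hw : 0 < w) (hx : 0 ≤ x) (hxw : x < w) : 0 ≤ y * w + x ↔ 0 ≤ y := by
  constructor
  · intro h; by_contra hy; push_neg at hy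
    have : y ≤ -1 := by omega
    have h2 : y * w ≤ (-1) * w := mul_le_mul_of_nonneg_right this (le_of_lt hw)
    omega
  · intro h; have := mul_nonneg h (le_of_lt hw); omega

lemma pvRowLt (w H y x : Int) (hw : 0 < w) (hx : 0 ≤ x) (hxw : x < w) : y * w + x < w * H ↔ y < H := by
  constructor
  · intro h
    have h1 : y * w < H * w := by nlinarith
    exact lt_of_mul_lt_mul_right h1 (le_of_lt hw)
  · intro h
    have h1 : (y + 1) * w ≤ H * w := mul_le_mul_of_nonneg_right (by omega) (le_of_lt hw)
    nlinarith

lemma pvModRow (w y x : Int) (hw : 0 < w) (hx : 0 ≤ x) (hxw : x < w) : PySem.Int.mod (y * w + x) w = x := by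
  rw [PySem.Int.mod_eq_emod_of_pos hw]
  have h : y * w + x = x + w * y := by ring
  rw [h, Int.add_mul_emod_self_left, Int.emod_eq_of_lt hx hxw]

lemma pvBorBits (bN bE bS bW : Prop) [Decidable bN] [Decidable bE] [Decidable bS] [Decidable bW] :
    (let mask : Int := 0
     let mask := if bN then PySem.Int.bor mask 1 else mask
     let mask := if bE then PySem.Int.bor mask 2 else mask
     let mask := if bS then PySem.Int.bor mask 4 else mask
     if bW then PySem.Int.bor mask 8 else mask)
    = (if bN then 1 else 0) + (if bE then 2 else 0) + (if bS then 4 else 0) + (if bW then 8 else 0) := by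
  by_cases hN : bN <;> by_cases hE : bE <;> by_cases hS : bS <;> by_cases hW : bW <;>
    simp [hN, hE, hS, hW] <;> decide

lemma pvFloordiv_nonpos (a b : Int) (ha : 0 ≤ a) (hb : b < 0) : PySem.Int.floordiv a b ≤ 0 := by
  have h1 := PySem.Int.floordiv_mul_add_mod a b
  have h2 := PySem.Int.mod_neg_bounds (a := a) hb
  by_contra h; push_neg at h
  have h3 : PySem.Int.floordiv a b * b < 0 := mul_neg_of_pos_of_neg h hb
  omega

lemma pvMaskA_eq (rd : List Int) (w H y x : Int) (hw : 0 < w) (hy : 0 ≤ y) (hyH : y < H)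
    (hx : 0 ≤ x) (hxw : x < w) :
    pvMaskAt rd w H y x
    = pvPmask rd w (w * H) (w * H) (y * w + x) := by
  unfold pvMaskAt
  rw [pvBorBits]
  unfold pvPmask
  have hjlt : y * w + x < w * H := (pvRowLt w H y x hw hx hxw).mpr hyH
  have hN : (y * w + x - w < w * H ∧ 0 ≤ y * w + x - w ∧ PySem.List.pyGetD rd (y * w + x - w) 0 ≠ 0)
      = (0 < y ∧ PySem.List.pyGetD rd ((y - 1) * w + x) 0 ≠ 0) := by
    rw [show y * w + x - w = (y - 1) * w + x from by ring]
    apply propext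
    constructor
    · rintro ⟨_, h0, hD⟩
      exact ⟨by have := (pvRowNonneg w (y - 1) x hw hx hxw).mp h0; omega, hD⟩
    · rintro ⟨hy0, hD⟩
      exact ⟨(pvRowLt w H (y - 1) x hw hx hxw).mpr (by omega),
             (pvRowNonneg w (y - 1) x hw hx hxw).mpr (by omega), hD⟩
  have hE : (y * w + x < w * H ∧ PySem.Int.mod (y * w + x) w ≠ w - 1 ∧ PySem.List.pyGetD rd (y * w + x + 1) 0 ≠ 0)
      = (x < w - 1 ∧ PySem.List.pyGetD rd (y * w + x + 1) 0 ≠ 0) := by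
    rw [pvModRow w y x hw hx hxw]
    apply propext
    constructor
    · rintro ⟨_, hm, hD⟩; exact ⟨by omega, hD⟩
    · rintro ⟨hm, hD⟩; exact ⟨hjlt, by omega, hD⟩
  have hS : (y * w + x < w * H ∧ y * w + x + w < w * H ∧ PySem.List.pyGetD rd (y * w + x + w) 0 ≠ 0)
      = (y < H - 1 ∧ PySem.List.pyGetD rd ((y + 1) * w + x) 0 ≠ 0) := by
    rw [show y * w + x + w = (y + 1) * w + x from by ring]
    apply propext
    constructor
    · rintro ⟨_, hb, hD⟩
      exact ⟨by have := (pvRowLt w H (y + 1) x hw hx hxw).mp hb; omega, hD⟩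
    · rintro ⟨hb, hD⟩
      exact ⟨hjlt, (pvRowLt w H (y + 1) x hw hx hxw).mpr (by omega), hD⟩
  have hW : (y * w + x - 1 < w * H ∧ 0 ≤ y * w + x - 1 ∧ PySem.Int.mod (y * w + x - 1) w ≠ w - 1 ∧ PySem.List.pyGetD rd (y * w + x - 1) 0 ≠ 0)
      = (0 < x ∧ PySem.List.pyGetD rd (y * w + x - 1) 0 ≠ 0) := by
    apply propext
    by_cases hx0 : 0 < x
    · rw [show y * w + x - 1 = y * w + (x - 1) from by ring,
          pvModRow w y (x - 1) hw (by omega) (by omega)]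
      constructor
      · rintro ⟨_, _, _, hD⟩; exact ⟨hx0, hD⟩
      · rintro ⟨_, hD⟩
        exact ⟨by omega, (pvRowNonneg w y (x - 1) hw (by omega) (by omega)).mpr hy, by omega, hD⟩
    · have hx0' : x = 0 := by omega
      subst hx0'
      by_cases hy0 : 0 < y
      · rw [show y * w + 0 - 1 = (y - 1) * w + (w - 1) from by ring,
            pvModRow w (y - 1) (w - 1) hw (by omega) (by omega)]
        constructor
        · rintro ⟨_, _, hm, _⟩; exact absurd rfl hm
        · rintro ⟨h0, _⟩; omega
      · have hy0' : y = 0 := by omega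
        subst hy0'
        constructor
        · rintro ⟨_, h0, _⟩; omega
        · rintro ⟨h0, _⟩; omega
  simp only [hN, hE, hS, hW]

lemma pvFlatten {α : Type} (g : α → Int → α) (w : Int) (hw : 0 < w) :
    ∀ (K : Nat) (init : α),
      (PySem.List.pyRange 0 (K : Int) 1).foldl (fun d y => (PySem.List.pyRange 0 w 1).foldl (fun d x => g d (y * w + x)) d) init
      = (PySem.List.pyRange 0 ((K : Int) * w) 1).foldl g init := by
  intro K
  induction K with
  | zero =>
    intro init
    rw [show ((0 : Nat) : Int) * w = 0 from by simp]
    rw [PySem.List.pyRange_one_eq_nil le_rfl]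
    simp
  | succ K ih =>
    intro init
    rw [show ((K + 1 : Nat) : Int) = (K : Int) + 1 from by push_cast; ring]
    rw [PySem.List.pyRange_one_succ_right (by positivity), List.foldl_append, ih]
    simp only [List.foldl_cons, List.foldl_nil]
    rw [show ((K : Int) + 1) * w = (K : Int) * w + w from by ring]
    rw [PySem.List.pyRange_one_append 0 ((K : Int) * w) ((K : Int) * w + w) (by positivity) (by omega)]
    rw [List.foldl_append]
    rw [PySem.List.pyRange_one ((K : Int) * w) ((K : Int) * w + w), PySem.List.pyRange_one 0 w]
    simp only [add_sub_cancel_left, sub_zero, List.foldl_map]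
    apply PySem.List.foldl_congr_mem
    intro acc t _
    norm_num

-- ===== VERDICT (by name: the statement is the Claim_ definition above) =====
theorem analyze_neighbors_spec : Claim_equal_analyze_neighbors := by
  intro rd w h _ hpre
  unfold Pre_analyze_neighbors at hpre
  unfold Spec_analyze_neighbors
  simp only [analyze_neighbors, analyze_neighbors_alt]
  by_cases hw : w ≤ 0
  · have hwneg : w < 0 := lt_of_le_of_ne hw hpre
    have hfd : PySem.Int.floordiv (rd.length : Int) w ≤ 0 :=
      pvFloordiv_nonpos _ _ (by positivity) hwneg
    have hH0 : min h (PySem.Int.floordiv (rd.length : Int) w) ≤ 0 :=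
      le_trans (min_le_right _ _) hfd
    rw [PySem.List.pyRange_one_eq_nil hH0, if_pos (Or.inl hw)]
    simp
  · push_neg at hw
    set H := min h (PySem.Int.floordiv (rd.length : Int) w) with hHdef
    by_cases hH0 : H ≤ 0
    · rw [PySem.List.pyRange_one_eq_nil hH0, if_pos (Or.inr hH0)]
      simp
    · push_neg at hH0
      rw [if_neg (by omega)]
      have hn0 : (0 : Int) ≤ w * H := by positivity
      have hsc : (PySem.List.pyRange 0 (w * H) 1).foldl (pvScatterStep rd w (w * H)) (List.replicate (w * H).toNat 0)
          = (List.range (w * H).toNat).map (fun t : Nat => pvPmask rd w (w * H) (w * H) (t : Int)) := by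
        have hcast : (((w * H).toNat : Nat) : Int) = w * H := Int.toNat_of_nonneg hn0
        have hh := pvScatter_inv rd w (w * H) hw hn0 (w * H).toNat (by rw [hcast])
        rwa [hcast] at hh
      rw [hsc]
      refine congrArg (fun d : PySem.Dict Int (PySem.Dict Int Int) => d.items.map (fun p => (p.1, p.2.items))) ?_
      have hA : (PySem.List.pyRange 0 H 1).foldl (fun d y =>
            (PySem.List.pyRange 0 w 1).foldl (fun d x =>
              let rd_ := PySem.List.pyGetD rd (y * w + x) 0
              if rd_ = 0 then d
              else pvRecord d (pvMaskAt rd w H y x) rd_) d) PySem.Dict.empty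
          = (PySem.List.pyRange 0 (w * H) 1).foldl (pvGFun rd w (w * H)) PySem.Dict.empty := by
        rw [PySem.List.foldl_congr_mem _ _
              (fun d y => (PySem.List.pyRange 0 w 1).foldl (fun d x => pvGFun rd w (w * H) d (y * w + x)) d) _
              (by
                intro acc y hy
                have hyb := (PySem.List.mem_pyRange_one).mp hy
                apply PySem.List.foldl_congr_mem
                intro acc2 xx hxx
                have hxb := (PySem.List.mem_pyRange_one).mp hxx
                unfold pvGFun
                by_cases hrd : PySem.List.pyGetD rd (y * w + xx) 0 = 0
                · simp [hrd]
                · simp only [if_neg hrd]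
                  rw [pvMaskA_eq rd w H y xx hw hyb.1 hyb.2 hxb.1 hxb.2])]
        have hfl := pvFlatten (pvGFun rd w (w * H)) w hw H.toNat PySem.Dict.empty
        rw [Int.toNat_of_nonneg (le_of_lt hH0)] at hfl
        rw [hfl, mul_comm H w]
      rw [hA]
      symm
      apply PySem.List.foldl_congr_mem
      intro acc i hi
      have hib := (PySem.List.mem_pyRange_one).mp hi
      have hmask : PySem.List.pyGetD ((List.range (w * H).toNat).map (fun t : Nat => pvPmask rd w (w * H) (w * H) (t : Int))) i 0
          = pvPmask rd w (w * H) (w * H) i := by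
        rw [PySem.List.pyGetD_eq_getElem _ _ hib.1 (by simp; omega)]
        simp only [List.getElem_map, List.getElem_range]
        rw [Int.toNat_of_nonneg hib.1]
      unfold pvGFun
      by_cases hrd : PySem.List.pyGetD rd i 0 = 0
      · simp [hrd]
      · simp [hrd, hmask]
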